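-- pv_equiv track=rewrite | github.com/miguelamica/informatica-gral | practica parcial 2 act 10 p1.py | crearLista
-- ===== SOURCE A (Python) =====
-- def esLetra(c):                          #<>
--     return (c>="a" and c<="z")
--
-- def esVocal(c):
--     return c in "aeiou"
--
-- def esMonolavica(pal):
--     i=0
--     x=0
--     vocal=""
--     while i<len(pal):
--         if esVocal(pal[i])==True:
--             vocal=vocal+pal[i]
--             i+=1
--         else:
--             i+=1
--     res=True
--     if len(vocal)==1:
--         res=True
--     elif vocal=="":
--         res=False
--     else:
--         while (x<len(vocal)-1):
--             if vocal[x]==vocal[x+1]: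
--                 x+=1
--             else:
--                 res=False
--                 x=len(vocal)-1
--     return res
--
-- def crearLista(texto):
--     i=0
--     lst=[]
--     while i<len(texto):
--         while i<len(texto) and not esLetra(texto[i]):
--             i+=1
--         pal=""
--         while i<len(texto) and esLetra(texto[i]):
--             pal=pal+texto[i]
--             i+=1
--         if esMonolavica(pal)==True and pal not in lst:
--             lst.append(pal)
--     return lst
-- ===== SOURCE B (Python) =====
-- def crearLista(texto):
--     # single-pass finite-state scan: track the current word and its vowel state
--     # (None = no vowel yet, a char = only that vowel seen, False = two distinct vowels),
--     # flushing at each non-letter boundary; dedup via a seen-set maintained alongside.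
--     res = []
--     seen = set()
--     word = []
--     v = None
--     for c in texto + ' ':          # trailing sentinel flushes the last word
--         if 'a' <= c <= 'z':
--             word.append(c)
--             if c in 'aeiou':
--                 if v is None:
--                     v = c
--                 elif v != c:
--                     v = False
--         elif word:
--             if v not in (None, False):
--                 w = ''.join(word)
--                 if w not in seen:
--                     seen.add(w)
--                     res.append(w)
--             word = []
--             v = None
--     return res
-- ===== Notes on version B (the rewrite author's own statement) =====
-- stated objective: faster
-- what changed: A tokenizes with nested index-walking while-loops, builds each word by quadratic string concatenation and re-scans it twice (collect its vowels into a string, then a pairwise adjacent-equality walk) before a list-membership dedup; B is a single left-to-right pass driven by a three-valued finite-state vowel tracker (no vowel / one vowel / two distinct) updated per character, flushing a word at each non-letter boundary and deduplicating with a seen-set, so no word is ever re-scanned.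
import Mathlib
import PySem

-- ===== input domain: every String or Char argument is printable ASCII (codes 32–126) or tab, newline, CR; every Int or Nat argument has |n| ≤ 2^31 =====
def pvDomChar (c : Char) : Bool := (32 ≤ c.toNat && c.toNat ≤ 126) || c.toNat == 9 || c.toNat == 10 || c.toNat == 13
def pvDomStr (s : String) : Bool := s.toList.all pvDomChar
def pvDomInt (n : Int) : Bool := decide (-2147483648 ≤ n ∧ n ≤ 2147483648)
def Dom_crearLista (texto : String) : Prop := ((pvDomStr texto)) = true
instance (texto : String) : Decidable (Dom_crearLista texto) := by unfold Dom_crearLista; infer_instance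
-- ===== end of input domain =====

-- B replaces A's nested while-loops with per-word rescans by a single left-to-right
-- finite-state scan (a three-valued vowel tracker flushed at non-letter boundaries).

-- ===== PORT A =====
-- Words are kept as List Char internally (Python builds them by string concatenation);
-- String.mk is applied at the end. List Char equality coincides with Python string equality.
def esLetra (c : Char) : Bool := 'a' ≤ c && c ≤ 'z'

def esVocal (c : Char) : Bool := "aeiou".toList.contains c

-- first while of esMonolavica: vocal = vocal + pal[i] for each vowel
def vocalLoop : List Char → List Char → List Char
  | [], vocal => vocal
  | c :: r, vocal => if esVocal c then vocalLoop r (vocal ++ [c]) else vocalLoop r vocal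

-- second while of esMonolavica: walk x comparing vocal[x] with vocal[x+1], stop at first mismatch
def adjLoop : List Char → Bool
  | [] => true
  | [_] => true
  | a :: b :: r => if a == b then adjLoop (b :: r) else false

def esMonolavica (pal : List Char) : Bool :=
  let vocal := vocalLoop pal []
  if vocal.length == 1 then true
  else if vocal == [] then false
  else adjLoop vocal

-- inner while: skip non-letters
def skipNon : List Char → List Char
  | [] => []
  | c :: r => if !esLetra c then skipNon r else c :: r

-- inner while: accumulate pal while letters (returns pal and the rest of the text)
def takeWord : List Char → List Char × List Char
  | [] => ([], [])
  | c :: r => if esLetra c then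
      let pr := takeWord r
      (c :: pr.1, pr.2)
    else ([], c :: r)

-- the next three theorems only justify termination of loopA (cited in its decreasing_by)
theorem skipNon_eq (l : List Char) : skipNon l = l.dropWhile (fun c => !esLetra c) := by
  induction l with
  | nil => rfl
  | cons c r ih => by_cases h : esLetra c <;> simp [skipNon, List.dropWhile, h, ih]

theorem takeWord_eq (l : List Char) :
    takeWord l = (l.takeWhile esLetra, l.dropWhile esLetra) := by
  induction l with
  | nil => rfl
  | cons c r ih => by_cases h : esLetra c <;> simp [takeWord, List.takeWhile, List.dropWhile, h, ih]

theorem loopA_rest_lt (cs : List Char) (h : cs ≠ []) :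
    ((takeWord (skipNon cs)).2).length < cs.length := by
  cases cs with
  | nil => exact absurd rfl h
  | cons c r =>
    rw [skipNon_eq, takeWord_eq]
    by_cases hc : esLetra c
    · simp [List.dropWhile, hc]
      exact List.length_dropWhile_le _ _
    · simp only [List.dropWhile, hc, Bool.not_false]
      have h1 := List.length_dropWhile_le (fun c => !esLetra c) r
      have h2 := List.length_dropWhile_le esLetra (r.dropWhile (fun c => !esLetra c))
      simp only [List.length_cons]
      omega

-- outer while of crearLista
def loopA (cs : List Char) (lst : List (List Char)) : List (List Char) :=
  if h : cs = [] then lst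
  else
    let pr := takeWord (skipNon cs)
    loopA pr.2 (if esMonolavica pr.1 && !lst.contains pr.1 then lst ++ [pr.1] else lst)
termination_by cs.length
decreasing_by exact loopA_rest_lt cs h

def crearLista (texto : String) : List String :=
  (loopA texto.toList []).map String.mk

-- ===== PORT B =====
-- v = None → VSt.noV ; v = a vowel char → VSt.one c ; v = False → VSt.bad
inductive VSt
  | noV
  | one : Char → VSt
  | bad
deriving DecidableEq, Repr

structure BSt where
  res : List (List Char)
  seen : PySem.Set (List Char)
  word : List Char
  v : VSt
deriving Repr

-- the if c in 'aeiou' / v is None / v != c chain of B's loop body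
def updV (v : VSt) (c : Char) : VSt :=
  if esVocal c then
    match v with
    | .noV => .one c
    | .one a => if a = c then .one a else .bad
    | .bad => .bad
  else v

-- one iteration of B's for-loop
def stepB (st : BSt) (c : Char) : BSt :=
  if 'a' ≤ c && c ≤ 'z' then
    { st with word := st.word ++ [c], v := updV st.v c }
  else if st.word ≠ [] then
    let st' :=
      if (match st.v with | .one _ => true | _ => false) then
        if PySem.Set.contains st.seen st.word then st
        else { st with res := st.res ++ [st.word], seen := PySem.Set.add st.seen st.word }
      else st
    { st' with word := [], v := .noV }
  else st

def crearLista_alt (texto : String) : List String :=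
  ((texto.toList ++ [' ']).foldl stepB ⟨[], PySem.Set.empty, [], .noV⟩).res.map String.mk

-- ===== PRECONDITION & SPEC =====
def Spec_crearLista (texto : String) (out : List String) : Prop := out = crearLista_alt texto
instance (texto : String) (out : List String) : Decidable (Spec_crearLista texto out) := by unfold Spec_crearLista; infer_instance

-- ===== CLAIM (what is proved, stated in full; the proofs are below) =====
def Claim_equal_crearLista : Prop := ∀ (texto : String), Dom_crearLista texto → Spec_crearLista texto (crearLista texto)

-- ===== LEMMAS AND PROOFS =====

def keepV : VSt → Bool
  | .one _ => true
  | _ => false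

def stepA (lst : List (List Char)) (w : List Char) : List (List Char) :=
  if esMonolavica w && !lst.contains w then lst ++ [w] else lst

-- the common token list: maximal runs of lowercase letters
def tokensA : List Char → List (List Char)
  | [] => []
  | c :: r =>
    if esLetra c then (c :: r.takeWhile esLetra) :: tokensA (r.dropWhile esLetra)
    else tokensA r
termination_by cs => cs.length
decreasing_by
  · exact Nat.lt_succ_of_le (List.length_dropWhile_le _ _)
  · simp

-- ---- A's scan produces a fold of its filter/dedup step over the token list ----
theorem loopA_eq_foldl : ∀ (n : Nat) (cs : List Char), cs.length ≤ n → ∀ lst,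
    loopA cs lst = (tokensA cs).foldl stepA lst := by
  intro n
  induction n with
  | zero =>
    intro cs hcs lst
    have : cs = [] := List.eq_nil_of_length_eq_zero (Nat.le_zero.mp hcs)
    subst this
    simp [loopA, tokensA]
  | succ n ih =>
    intro cs hcs lst
    cases cs with
    | nil => simp [loopA, tokensA]
    | cons c r =>
      have hr : r.length ≤ n := by simpa using hcs
      by_cases hc : esLetra c
      · rw [loopA]
        simp only [skipNon_eq, List.dropWhile_cons, hc,
          Bool.not_true, takeWord_eq]
        simp only [Bool.false_eq_true, if_false, List.takeWhile_cons, hc, List.dropWhile_cons,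
          if_true]
        rw [ih _ (le_trans (List.length_dropWhile_le _ _) hr)]
        rw [show tokensA (c :: r) = (c :: r.takeWhile esLetra) :: tokensA (r.dropWhile esLetra)
             from by simp [tokensA, hc]]
        simp [stepA]
      · have hstep : loopA (c :: r) lst = loopA r lst := by
          cases r with
          | nil =>
            rw [loopA, loopA]
            simp [skipNon, hc, takeWord, esMonolavica, vocalLoop, loopA]
          | cons d r' =>
            conv_lhs => rw [loopA]
            conv_rhs => rw [loopA]
            rw [dif_neg (List.cons_ne_nil c (d :: r')), dif_neg (List.cons_ne_nil d r'),
              show skipNon (c :: d :: r') = skipNon (d :: r') from by simp [skipNon, hc]]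
        rw [hstep, ih r hr lst,
          show tokensA (c :: r) = tokensA r from by simp [tokensA, hc]]

-- ---- A's monovocality test = the final value of B's vowel-state machine ----
theorem vocalLoop_eq (l : List Char) : ∀ acc, vocalLoop l acc = acc ++ l.filter esVocal := by
  induction l with
  | nil => simp [vocalLoop]
  | cons c r ih => intro acc; by_cases h : esVocal c <;> simp [vocalLoop, h, ih]

theorem adj_all (v : List Char) : ∀ a, adjLoop (a :: v) = v.all (· == a) := by
  induction v with
  | nil => intro a; rfl
  | cons b u ih =>
    intro a
    by_cases h : a = b
    · subst h; simp [adjLoop, ih]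
    · simp [adjLoop, h, Ne.symm h]

-- updV restricted to vowels
def vStep (v : VSt) (c : Char) : VSt :=
  match v with
  | .noV => .one c
  | .one a => if a = c then .one a else .bad
  | .bad => .bad

theorem updV_eq (v : VSt) (c : Char) : updV v c = if esVocal c then vStep v c else v := rfl

theorem foldl_updV_filter (w : List Char) : ∀ v,
    w.foldl updV v = (w.filter esVocal).foldl vStep v := by
  induction w with
  | nil => intro v; rfl
  | cons c r ih =>
    intro v
    by_cases h : esVocal c <;> simp [updV_eq, h, ih]

theorem foldl_vStep_bad (u : List Char) : u.foldl vStep .bad = .bad := by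
  induction u with
  | nil => rfl
  | cons b t ih => simpa [vStep] using ih

theorem foldl_vStep_one (u : List Char) : ∀ a,
    u.foldl vStep (.one a) = if u.all (· == a) then .one a else .bad := by
  induction u with
  | nil => intro a; rfl
  | cons b t ih =>
    intro a
    by_cases h : b = a
    · subst h; simp [vStep, ih]
    · have h' : ¬ a = b := fun e => h e.symm
      simp [vStep, h', foldl_vStep_bad, h]

theorem keep_eq_mono (w : List Char) :
    keepV (w.foldl updV .noV) = esMonolavica w := by
  rw [foldl_updV_filter]
  unfold esMonolavica
  rw [vocalLoop_eq]
  simp only [List.nil_append]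
  cases hv : w.filter esVocal with
  | nil => simp [keepV]
  | cons a u =>
    simp only [List.foldl_cons, vStep, foldl_vStep_one]
    cases u with
    | nil => simp [keepV]
    | cons b t =>
      rw [adj_all]
      by_cases hall : (b :: t).all (· == a) <;> simp [hall, keepV]

-- ---- B's per-character fold, characterised over the token structure ----
theorem foldB_run (w : List Char) (hw : ∀ c ∈ w, esLetra c = true) (st : BSt) :
    w.foldl stepB st = ⟨st.res, st.seen, st.word ++ w, w.foldl updV st.v⟩ := by
  induction w generalizing st with
  | nil => simp
  | cons c r ih =>
    have hc : ('a' ≤ c && c ≤ 'z') = true := hw c (by simp)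
    simp only [List.foldl_cons]
    rw [show stepB st c = { st with word := st.word ++ [c], v := updV st.v c } from by
      simp [stepB, hc]]
    rw [ih (fun d hd => hw d (by simp [hd]))]
    simp

def stepA' (res : List (List Char)) (w : List Char) (v : VSt) : List (List Char) :=
  if keepV v && !res.contains w then res ++ [w] else res

theorem stepA'_eq (res : List (List Char)) (w : List Char) (v : VSt)
    (h : keepV v = esMonolavica w) : stepA' res w v = stepA res w := by
  simp [stepA', stepA, h]

theorem stepB_flush (c : Char) (hc : esLetra c = false) (res : List (List Char))
    (w : List Char) (hw : w ≠ []) (v : VSt) :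
    stepB ⟨res, res, w, v⟩ c = ⟨stepA' res w v, stepA' res w v, [], .noV⟩ := by
  have hc' : ¬ (('a' ≤ c && c ≤ 'z') = true) := by simpa [esLetra] using hc
  simp only [stepB, hc', if_false, hw, ite_not]
  cases v with
  | one a =>
    by_cases hm : res.contains w <;>
      simp [stepA', keepV, PySem.Set.contains, PySem.Set.add,
        List.contains_eq_mem, decide_eq_true_eq] at * <;> simp [hm]
  | noV => simp [stepA', keepV]
  | bad => simp [stepA', keepV]

theorem stepB_skip (c : Char) (hc : esLetra c = false) (st : BSt)
    (hw : st.word = []) : stepB st c = st := by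
  have hc' : ¬ (('a' ≤ c && c ≤ 'z') = true) := by simpa [esLetra] using hc
  simp [stepB, hc', hw]

theorem head_dropWhile (r : List Char) (d : Char) (t : List Char)
    (h : r.dropWhile esLetra = d :: t) : esLetra d = false := by
  have := List.head?_dropWhile_not esLetra r
  rw [h] at this
  simpa using this

theorem foldB_tokens : ∀ (n : Nat) (cs : List Char), cs.length ≤ n → ∀ res,
    ((cs ++ [' ']).foldl stepB ⟨res, res, [], .noV⟩).res = (tokensA cs).foldl stepA res := by
  intro n
  induction n with
  | zero =>
    intro cs hcs res
    have : cs = [] := List.eq_nil_of_length_eq_zero (Nat.le_zero.mp hcs)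
    subst this
    simp [tokensA, stepB_skip ' ' (by decide)]
  | succ n ih =>
    intro cs hcs res
    cases cs with
    | nil => simp [tokensA, stepB_skip ' ' (by decide)]
    | cons c r =>
      have hr : r.length ≤ n := by simpa using hcs
      by_cases hc : esLetra c
      · -- a maximal run w = c :: takeWhile starts here
        have hlet : ∀ d ∈ c :: r.takeWhile esLetra, esLetra d = true := by
          intro d hd
          rcases hd with _ | hd
          · exact hc
          · exact List.mem_takeWhile_imp (by assumption)
        have hsplit : (c :: r) ++ [' ']
            = (c :: r.takeWhile esLetra) ++ (r.dropWhile esLetra ++ [' ']) := by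
          simp [← List.append_assoc, List.takeWhile_append_dropWhile]
        rw [hsplit, List.foldl_append, foldB_run _ hlet]
        simp only [List.nil_append]
        rw [show tokensA (c :: r) = (c :: r.takeWhile esLetra) :: tokensA (r.dropWhile esLetra)
             from by simp [tokensA, hc]]
        have hmono : keepV (List.foldl updV (updV VSt.noV c) (r.takeWhile esLetra))
            = esMonolavica (c :: r.takeWhile esLetra) := keep_eq_mono (c :: r.takeWhile esLetra)
        cases hrest : r.dropWhile esLetra with
        | nil =>
          simp only [List.nil_append, List.foldl_cons, List.foldl_nil]
          rw [stepB_flush ' ' (by decide) res _ (by simp) _]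
          simp [stepA'_eq _ _ _ hmono, tokensA]
        | cons d t =>
          have hd : esLetra d = false := head_dropWhile r d t hrest
          simp only [List.cons_append, List.foldl_cons]
          rw [stepB_flush d hd res _ (by simp) _]
          have ht : t.length ≤ n := by
            have h1 : (d :: t).length ≤ r.length := hrest ▸ List.length_dropWhile_le _ _
            simp at h1; omega
          rw [ih t ht]
          rw [show tokensA (d :: t) = tokensA t from by simp [tokensA, hd],
            stepA'_eq _ _ _ hmono]
      · -- c is skipped by both sides
        rw [show (c :: r) ++ [' '] = c :: (r ++ [' ']) from rfl, List.foldl_cons,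
          stepB_skip c (by simpa using hc) _ rfl, ih r hr,
          show tokensA (c :: r) = tokensA r from by simp [tokensA, hc]]

-- ===== VERDICT (by name: the statement is the Claim_ definition above) =====
theorem crearLista_spec : Claim_equal_crearLista := by
  intro texto _
  unfold Spec_crearLista crearLista crearLista_alt
  rw [loopA_eq_foldl texto.toList.length texto.toList le_rfl,
    show (PySem.Set.empty : PySem.Set (List Char)) = ([] : List (List Char)) from rfl,
    foldB_tokens texto.toList.length texto.toList le_rfl]
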